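-- pv_equiv track=rewrite | github.com/Infrapink/calconv | roman_i.py | nyd
-- ===== SOURCE A (Python) =====
-- epoch = 1445272 # nominal 1 Ianuarius of year 0 (that is -1)
--
-- def leap(year):
--     '''Returns the number of days in the year, assuming a year 0'''
--     year = int(year)
--     ans = 355 + (22 * int(year % 2 == 0)) + int(year % 4 == 2)
--     return ans
--
-- def nyd(year):
--     '''Compute New Year's Day for a given year, assuming a year 0'''
--     year = int(year)
--
--     y = 8 * (year // 8)
--     ans = epoch + (2930 * (year // 8))
--     while (y < year):
--         ans += leap(y)
--         y += 1
--     while (y > year):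
--         year -= 1
--         ans -= leap(year)
--     return ans
-- ===== SOURCE B (Python) =====
-- def nyd(year):
--     '''Compute New Year's Day for a given year, assuming a year 0'''
--     year = int(year)
--     q, r = divmod(year, 8)
--     return 1445272 + 2930 * q + 355 * r + 22 * ((r + 1) // 2) + (r > 2) + (r > 6)
-- ===== Notes on version B (the rewrite author's own statement) =====
-- stated objective: simpler
-- what changed: Replaces the two while loops (which call leap() once per year of the residue) with a single closed-form arithmetic expression over divmod(year, 8).
import Mathlib
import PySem

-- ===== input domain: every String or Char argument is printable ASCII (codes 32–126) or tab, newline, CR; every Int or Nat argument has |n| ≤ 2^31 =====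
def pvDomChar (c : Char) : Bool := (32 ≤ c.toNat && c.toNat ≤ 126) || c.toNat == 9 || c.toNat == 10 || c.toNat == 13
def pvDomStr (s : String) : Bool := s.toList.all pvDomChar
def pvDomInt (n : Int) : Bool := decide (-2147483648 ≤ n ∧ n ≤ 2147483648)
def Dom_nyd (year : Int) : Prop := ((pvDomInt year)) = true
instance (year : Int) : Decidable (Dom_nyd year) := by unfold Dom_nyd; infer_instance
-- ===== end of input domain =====

-- B replaces A's two while loops (one leap() call per residue year) with a single closed-form
-- arithmetic expression over divmod(year, 8); objective: simpler.

-- ===== PORT A =====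
def leapA (year : Int) : Int :=
  355 + 22 * (if PySem.Int.mod year 2 = 0 then 1 else 0)
      + (if PySem.Int.mod year 4 = 2 then 1 else 0)

-- first while loop: while y < year: ans += leap(y); y += 1   (returns the final (y, ans))
def nydLoop1 (y year ans : Int) : Int × Int :=
  if y < year then nydLoop1 (y + 1) year (ans + leapA y) else (y, ans)
termination_by (year - y).toNat
decreasing_by omega

-- second while loop: while y > year: year -= 1; ans -= leap(year).
-- If entered, this Python loop never terminates (year moves away from y), so it carries a
-- fuel parameter; at nyd's call site y = year after the first loop, the guard is false and
-- the fuel is never consumed.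
def nydLoop2 (fuel : Nat) (y year ans : Int) : Int :=
  if y > year then
    match fuel with
    | 0 => ans
    | f + 1 => nydLoop2 f y (year - 1) (ans - leapA (year - 1))
  else ans

def nyd (year : Int) : Int :=
  let y := 8 * (PySem.Int.floordiv year 8)
  let ans := 1445272 + 2930 * (PySem.Int.floordiv year 8)
  let p := nydLoop1 y year ans
  nydLoop2 (p.1 - year).toNat p.1 year p.2

-- ===== PORT B =====
def nyd_alt (year : Int) : Int :=
  let q := PySem.Int.floordiv year 8
  let r := PySem.Int.mod year 8
  1445272 + 2930 * q + 355 * r + 22 * (PySem.Int.floordiv (r + 1) 2)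
    + (if r > 2 then 1 else 0) + (if r > 6 then 1 else 0)

-- ===== PRECONDITION & SPEC =====
def Spec_nyd (year : Int) (out : Int) : Prop := out = nyd_alt year
instance (year : Int) (out : Int) : Decidable (Spec_nyd year out) := by unfold Spec_nyd; infer_instance

-- ===== CLAIM (what is proved, stated in full; the proofs are below) =====
def Claim_equal_nyd : Prop := ∀ (year : Int), Dom_nyd year → Spec_nyd year (nyd year)

-- ===== LEMMAS AND PROOFS =====

-- Ssum n y = leapA y + leapA (y+1) + … + leapA (y+n-1): what the first loop adds to ans
def Ssum : Nat → Int → Int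
  | 0, _ => 0
  | n + 1, y => leapA y + Ssum n (y + 1)

theorem nydLoop1_step (y year ans : Int) (h : y < year) :
    nydLoop1 y year ans = nydLoop1 (y + 1) year (ans + leapA y) := by
  rw [nydLoop1]; simp [h]

theorem nydLoop1_exit (y year ans : Int) (h : ¬ y < year) :
    nydLoop1 y year ans = (y, ans) := by
  rw [nydLoop1]; simp [h]

theorem nydLoop2_exit (fuel : Nat) (y year ans : Int) (h : ¬ y > year) :
    nydLoop2 fuel y year ans = ans := by
  rw [nydLoop2.eq_def]; simp [h]

theorem loop1_spec (n : Nat) : ∀ (y year ans : Int), year - y = n →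
    nydLoop1 y year ans = (year, ans + Ssum n y) := by
  induction n with
  | zero =>
    intro y year ans h
    have hyy : year = y := by omega
    rw [nydLoop1_exit _ _ _ (by omega)]
    simp [Ssum, hyy]
  | succ m ih =>
    intro y year ans h
    rw [nydLoop1_step _ _ _ (by omega), ih (y + 1) year _ (by omega), Ssum]
    have : ans + leapA y + Ssum m (y + 1) = ans + (leapA y + Ssum m (y + 1)) := by ring
    rw [this]

theorem mod_shift (q s b : Int) (hb : 0 < b) (hd : b ∣ 8) :
    PySem.Int.mod (8 * q + s) b = PySem.Int.mod s b := by
  rw [PySem.Int.mod_eq_emod_of_pos hb, PySem.Int.mod_eq_emod_of_pos hb]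
  obtain ⟨c, hc⟩ := hd
  have h8 : 8 * q + s = s + b * (c * q) := by rw [hc]; ring
  rw [h8, Int.add_mul_emod_self_left]

theorem leapA_shift (q s : Int) : leapA (8 * q + s) = leapA s := by
  unfold leapA
  rw [mod_shift q s 2 (by norm_num) ⟨4, by norm_num⟩,
      mod_shift q s 4 (by norm_num) ⟨2, by norm_num⟩]

theorem Ssum_shift (n : Nat) (q : Int) : ∀ y : Int, Ssum n (8 * q + y) = Ssum n y := by
  induction n with
  | zero => intro y; rfl
  | succ m ih =>
    intro y
    show leapA (8 * q + y) + Ssum m (8 * q + y + 1) = leapA y + Ssum m (y + 1)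
    rw [leapA_shift, show 8 * q + y + 1 = 8 * q + (y + 1) from by ring, ih]

-- closed-form value of the loop's sum for each residue n < 8
theorem Ssum_key (n : Nat) (h : n < 8) :
    Ssum n 0 = 355 * (n : Int) + 22 * PySem.Int.floordiv ((n : Int) + 1) 2
      + (if (n : Int) > 2 then 1 else 0) + (if (n : Int) > 6 then 1 else 0) := by
  interval_cases n <;> decide

-- ===== VERDICT (by name: the statement is the Claim_ definition above) =====
theorem nyd_spec : Claim_equal_nyd := by
  intro year _
  unfold Spec_nyd nyd nyd_alt
  simp only
  have hy := PySem.Int.floordiv_mul_add_mod year 8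
  set q := PySem.Int.floordiv year 8 with hq
  set r := PySem.Int.mod year 8 with hr'
  have hr0 : 0 ≤ r := PySem.Int.mod_nonneg year (by norm_num)
  have hr8 : r < 8 := PySem.Int.mod_lt year (by norm_num)
  obtain ⟨n, hn⟩ : ∃ n : Nat, year - 8 * q = (n : Int) := ⟨(year - 8 * q).toNat, by omega⟩
  rw [loop1_spec n _ _ _ hn]
  simp only
  rw [nydLoop2_exit _ _ _ _ (by omega), show (8 : Int) * q = 8 * q + 0 from by ring, Ssum_shift]
  have hrn : r = (n : Int) := by omega
  have hn8 : n < 8 := by omega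
  rw [hrn, Ssum_key n hn8]
  ring
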